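-- pv_equiv track=rewrite | github.com/Cave-8/String-Utilities | strings.py | assignDirection
-- ===== SOURCE A (Python) =====
-- def assignDirection(backtrack):
--     direction = "?"
--     currVal = float('-inf')
--     for b in range(len(backtrack)):
--         if backtrack[b] >= currVal:
--             currVal = backtrack[b]
--             if b == 0:
--                 direction = "LEFT"
--             elif b == 1:
--                 direction = "UP"
--             else:
--                 direction = "DIAG"
--     return direction
-- ===== SOURCE B (Python) =====
-- def assignDirection(backtrack):
--     if not backtrack:
--         return "?"
--     best = max(backtrack)
--     last = max(i for i, v in enumerate(backtrack) if v == best)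
--     return "LEFT" if last == 0 else "UP" if last == 1 else "DIAG"
-- ===== Notes on version B (the rewrite author's own statement) =====
-- stated objective: simpler
-- what changed: Replaces A's fused single-pass incremental argmax with running state (direction, currVal starting at -inf) by a two-pass reduce-then-locate decomposition: compute max once, pick the last index attaining it, map it to a label with a ternary.
import Mathlib
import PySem

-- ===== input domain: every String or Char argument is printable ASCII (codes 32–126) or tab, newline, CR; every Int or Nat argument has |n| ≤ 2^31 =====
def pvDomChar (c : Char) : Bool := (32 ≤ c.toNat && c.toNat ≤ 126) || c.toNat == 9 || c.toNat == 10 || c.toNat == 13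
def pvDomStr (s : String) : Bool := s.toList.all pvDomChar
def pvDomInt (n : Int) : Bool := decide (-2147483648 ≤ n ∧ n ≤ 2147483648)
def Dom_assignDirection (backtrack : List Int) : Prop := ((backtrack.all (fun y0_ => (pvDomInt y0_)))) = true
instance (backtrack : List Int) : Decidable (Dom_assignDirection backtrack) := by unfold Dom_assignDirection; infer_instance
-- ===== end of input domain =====

-- B replaces A's fused single-pass argmax loop with a two-pass reduce-then-locate decomposition (max once, then last index attaining it); simpler, same cost.


-- ===== PORT A =====
-- A's loop over range(len(backtrack)) as structural recursion over the list with the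
-- index b carried along; currVal = float('-inf') is modelled by Option Int (none = -inf,
-- so 'backtrack[b] >= currVal' is true at none) — exact, since the list holds only ints.
def goA : List Int → Int → String → Option Int → String
  | [], _, direction, _ => direction
  | x :: rest, b, direction, currVal =>
    if (match currVal with | none => true | some c => decide (c ≤ x)) then
      goA rest (b + 1) (if b == 0 then "LEFT" else if b == 1 then "UP" else "DIAG") (some x)
    else
      goA rest (b + 1) direction currVal

def assignDirection (backtrack : List Int) : String :=
  goA backtrack 0 "?" none

-- ===== PORT B =====
def assignDirection_alt (backtrack : List Int) : String :=
  if backtrack = [] then "?"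
  else
    match PySem.List.max? backtrack (fun y => y) with
    | none => "?"
    | some best =>
      match PySem.List.max?
          (((PySem.List.enumerate backtrack).filter (fun p => p.2 == best)).map (fun p => p.1))
          (fun y => y) with
      | none => "?"
      | some last => if last == 0 then "LEFT" else if last == 1 then "UP" else "DIAG"

-- ===== PRECONDITION & SPEC =====
def Spec_assignDirection (backtrack : List Int) (out : String) : Prop := out = assignDirection_alt backtrack
instance (backtrack : List Int) (out : String) : Decidable (Spec_assignDirection backtrack out) := by unfold Spec_assignDirection; infer_instance

-- ===== CLAIM (what is proved, stated in full; the proofs are below) =====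
def Claim_equal_assignDirection : Prop := ∀ (backtrack : List Int), Dom_assignDirection backtrack → Spec_assignDirection backtrack (assignDirection backtrack)

-- ===== LEMMAS AND PROOFS =====

-- the index → label map shared by both ports
def lab (i : Int) : String := if i == 0 then "LEFT" else if i == 1 then "UP" else "DIAG"

-- 'x >= currVal' with currVal : Option Int (none = -inf)
def geOpt (x : Int) : Option Int → Bool
  | none => true
  | some c => decide (c ≤ x)

-- running max of the loop state, as an Option Int
def foldOpt (cur : Option Int) (xs : List Int) : Option Int :=
  xs.foldl (fun c y => some (match c with | none => y | some c' => max c' y)) cur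

theorem foldOpt_some (t : List Int) (a : Int) : foldOpt (some a) t = some (t.foldl max a) := by
  induction t generalizing a with
  | nil => rfl
  | cons y t ih => simp [foldOpt, List.foldl] at *; exact ih (max a y)

theorem stepA (xs : List Int) (x : Int) :
    ∀ (b : Int) (dir : String) (cur : Option Int),
    goA (xs ++ [x]) b dir cur
      = if geOpt x (foldOpt cur xs) then lab (b + xs.length) else goA xs b dir cur := by
  induction xs with
  | nil =>
    intro b dir cur
    simp only [List.nil_append, List.length_nil, Int.natCast_zero, add_zero, foldOpt, List.foldl]
    cases cur with
    | none => simp [goA, geOpt, lab]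
    | some c => by_cases h : c ≤ x <;> simp [goA, geOpt, lab, h]
  | cons y t ih =>
    intro b dir cur
    have hlen : b + 1 + (t.length : Int) = b + ((y :: t).length : Int) := by
      simp [List.length_cons]; omega
    have hgo : ∀ (c : Option Int) (d : String),
        goA (y :: (t ++ [x])) b d c
          = if geOpt y c then
              goA (t ++ [x]) (b + 1)
                (if b == 0 then "LEFT" else if b == 1 then "UP" else "DIAG") (some y)
            else goA (t ++ [x]) (b + 1) d c := by
      intro c d; cases c <;> simp [goA, geOpt]
    have hgo' : ∀ (c : Option Int) (d : String),
        goA (y :: t) b d c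
          = if geOpt y c then
              goA t (b + 1)
                (if b == 0 then "LEFT" else if b == 1 then "UP" else "DIAG") (some y)
            else goA t (b + 1) d c := by
      intro c d; cases c <;> simp [goA, geOpt]
    rw [List.cons_append, hgo, hgo']
    by_cases hy : geOpt y cur = true
    · rw [if_pos hy, if_pos hy, ih]
      have hfo : foldOpt cur (y :: t) = foldOpt (some y) t := by
        cases cur with
        | none => rfl
        | some c =>
          have : c ≤ y := by simpa [geOpt] using hy
          show foldOpt (some (max c y)) t = _
          rw [max_eq_right this]
      rw [hfo, hlen]
    · rw [if_neg hy, if_neg hy, ih]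
      have hfo : foldOpt cur (y :: t) = foldOpt cur t := by
        cases cur with
        | none => simp [geOpt] at hy
        | some c =>
          have : ¬ c ≤ y := by simpa [geOpt] using hy
          show foldOpt (some (max c y)) t = _
          rw [max_eq_left (le_of_not_ge this)]
      rw [hfo]
      by_cases hg : geOpt x (foldOpt cur t) = true
      · rw [if_pos hg, if_pos hg, hlen]
      · rw [if_neg hg, if_neg hg]

theorem maxLast (ns : List Int) (n : Int) (h : ∀ m ∈ ns, m ≤ n) :
    PySem.List.max? (ns ++ [n]) (fun y => y) = some n := by
  cases ns with
  | nil => simpa using PySem.List.max?_id_cons n []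
  | cons hd t =>
    rw [List.cons_append, PySem.List.max?_id_cons]
    have hfold : List.foldl max hd t ≤ n := by
      rcases PySem.List.foldl_max_mem t hd with he | he
      · rw [he]; exact h hd (by simp)
      · exact h _ (by simp [he])
    simp [List.foldl_append, max_eq_right hfold]

theorem filt_idx_le (xs : List Int) (best : Int) (m : Int)
    (hm : m ∈ ((PySem.List.enumerate xs).filter (fun p => p.2 == best)).map (fun p => p.1)) :
    m ≤ (xs.length : Int) := by
  rcases List.mem_map.mp hm with ⟨p, hp, rfl⟩
  have hp' := List.mem_filter.mp hp |>.1
  rcases (PySem.List.mem_enumerate_iff xs 0 p).mp hp' with ⟨k, hk, rfl⟩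
  simp
  omega

theorem altMatch (l : List Int) (hne : l ≠ []) (best : Int)
    (hb : PySem.List.max? l (fun y => y) = some best) :
    assignDirection_alt l
      = match PySem.List.max?
            (((PySem.List.enumerate l).filter (fun p => p.2 == best)).map (fun p => p.1))
            (fun y => y) with
        | none => "?"
        | some last => lab last := by
  rw [assignDirection_alt, if_neg hne, hb]
  rfl

theorem stepB (xs : List Int) (x : Int) :
    assignDirection_alt (xs ++ [x])
      = if geOpt x (foldOpt none xs) then lab (xs.length) else assignDirection_alt xs := by
  cases xs with
  | nil =>
    rw [List.nil_append]
    rw [altMatch [x] (by simp) x (by simpa using PySem.List.max?_id_cons x [])]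
    simp [PySem.List.enumerate_cons, PySem.List.enumerate_nil, geOpt, foldOpt, lab,
      PySem.List.max?_id_cons]
  | cons hd t =>
    have hne : hd :: t ++ [x] ≠ [] := by simp
    set M := List.foldl max hd t with hM
    have hfo : foldOpt none (hd :: t) = some M := by
      rw [show foldOpt none (hd :: t) = foldOpt (some hd) t from rfl, foldOpt_some]
    have hmax1 : PySem.List.max? (hd :: t ++ [x]) (fun y => y) = some (max M x) := by
      rw [show hd :: t ++ [x] = hd :: (t ++ [x]) from rfl, PySem.List.max?_id_cons]
      simp [List.foldl_append, hM]
    have henum : PySem.List.enumerate (hd :: t ++ [x]) 0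
        = PySem.List.enumerate (hd :: t) 0 ++ [(((hd :: t).length : Int), x)] := by
      rw [show hd :: t ++ [x] = (hd :: t) ++ [x] from rfl, PySem.List.enumerate_append]
      simp [PySem.List.enumerate_cons, PySem.List.enumerate_nil]
    by_cases h : M ≤ x
    · -- new element is (weakly) the max: best = x, last index = length
      rw [if_pos (by simp [hfo, geOpt, h])]
      have hbest : max M x = x := max_eq_right h
      rw [altMatch _ hne (max M x) hmax1, hbest]
      have hfilter :
          (((PySem.List.enumerate (hd :: t ++ [x])).filter (fun p => p.2 == x)).map (fun p => p.1))
            = (((PySem.List.enumerate (hd :: t)).filter (fun p => p.2 == x)).map (fun p => p.1))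
              ++ [(((hd :: t).length : Int))] := by
        rw [henum, List.filter_append, List.map_append]
        simp
      rw [hfilter, maxLast _ _ (fun m hm => filt_idx_le (hd :: t) x m hm)]
    · -- old max strictly larger: best and the filtered index list are unchanged
      rw [if_neg (by simp [hfo, geOpt, h])]
      have hbest : max M x = M := max_eq_left (le_of_not_ge h)
      have hxne : (x == M) = false := by
        simp only [beq_eq_false_iff_ne, ne_eq]
        intro he; exact h (le_of_eq he.symm)
      have hmax2 : PySem.List.max? (hd :: t) (fun y => y) = some M := by
        rw [PySem.List.max?_id_cons, hM]
      rw [altMatch _ hne (max M x) hmax1, hbest, altMatch (hd :: t) (by simp) M hmax2]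
      have hfilter :
          ((PySem.List.enumerate (hd :: t ++ [x])).filter (fun p => p.2 == M))
            = ((PySem.List.enumerate (hd :: t)).filter (fun p => p.2 == M)) := by
        rw [henum, List.filter_append]
        simp [hxne]
      rw [hfilter]

theorem abEq (backtrack : List Int) : assignDirection backtrack = assignDirection_alt backtrack := by
  induction backtrack using List.reverseRecOn with
  | nil => rfl
  | append_singleton xs x ih =>
    rw [show assignDirection (xs ++ [x]) = goA (xs ++ [x]) 0 "?" none from rfl,
      stepA, stepB, ← ih]
    simp [assignDirection]

-- ===== VERDICT (by name: the statement is the Claim_ definition above) =====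
theorem assignDirection_spec : Claim_equal_assignDirection := by
  intro backtrack _
  exact abEq backtrack
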